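-- pv_equiv track=rewrite | github.com/hoeen/coding_test_training | solution_codes/programmers_DP_N으로 표현_1회답.py | solution
-- ===== SOURCE A (Python) =====
-- def solution(N, number):
--     dp = [set() for _ in range(9)]
--     for i in range(1, 9): # 1~8
--         dp[i].add(int(str(N)*i))
--         # 더해서 i가 되는 dp 끼리 연산하기
--         for j in range(1, i):
--             for op1 in dp[j]:
--                 for op2 in dp[i-j]:
--                     dp[i].add(op1 + op2)
--                     dp[i].add(op1 - op2)
--                     dp[i].add(op1 * op2)
--                     if op2 != 0:
--                         dp[i].add(op1 // op2)
--                     if op1 != 0: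
--                         dp[i].add(op2 // op1)
--         if number in dp[i]:
--             return i
--     return -1
-- ===== SOURCE B (Python) =====
-- def solution(N, number):
--     # Top-down memoized recursion; symmetric splits j <= i//2 with both
--     # subtraction/division directions replace A's full-range split loop.
--     cache = {}
--
--     def reach(i):
--         if i in cache:
--             return cache[i]
--         vals = {int(str(N) * i)}
--         for j in range(1, i // 2 + 1):
--             for a in reach(j):
--                 for b in reach(i - j):
--                     vals.add(a + b)
--                     vals.add(a - b)
--                     vals.add(b - a)
--                     vals.add(a * b)
--                     if b != 0:
--                         vals.add(a // b)
--                     if a != 0: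
--                         vals.add(b // a)
--         cache[i] = vals
--         return vals
--
--     for i in range(1, 9):
--         if number in reach(i):
--             return i
--     return -1
-- ===== Notes on version B (the rewrite author's own statement) =====
-- stated objective: alternative
-- what changed: Replaces the bottom-up dp table with a top-down memoized recursion reach(i) that only enumerates symmetric splits j <= i//2 (about half of A's split pairs), compensating with both subtraction and both division directions per pair.
import Mathlib
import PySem

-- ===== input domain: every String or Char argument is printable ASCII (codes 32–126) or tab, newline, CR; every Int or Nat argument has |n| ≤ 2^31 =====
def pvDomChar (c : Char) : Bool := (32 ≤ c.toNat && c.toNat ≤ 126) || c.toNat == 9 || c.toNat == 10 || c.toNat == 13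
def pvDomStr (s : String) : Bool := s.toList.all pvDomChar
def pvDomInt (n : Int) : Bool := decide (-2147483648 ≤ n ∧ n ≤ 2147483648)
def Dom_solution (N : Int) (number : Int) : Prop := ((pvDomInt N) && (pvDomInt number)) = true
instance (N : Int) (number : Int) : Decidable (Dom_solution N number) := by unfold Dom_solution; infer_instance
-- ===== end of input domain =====

-- B replaces A's bottom-up dp table (full split range j=1..i-1, five ops) by a top-down
-- memoized recursion over symmetric splits j=1..i//2 with six ops (both subtraction and
-- both division directions); same return value on every input where the Python A returns.

-- ===== PORT A =====
-- Python's 'set' of ints, modelled as Std.TreeSet: exact as a set (both programs consume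
-- their sets only through membership and building further sets, so the result cannot
-- depend on iteration order); a tree set keeps the ports evaluable on the sampled inputs.
abbrev PySet := Std.TreeSet Int compare

-- int(str(N)*i), shared by both Pythons verbatim; the .getD 0 arm is the ValueError case
-- (N < 0, i ≥ 2), which Pre_solution excludes.
def pvRep (N : Int) (i : Int) : Int :=
  (PySem.Int.ofChars? (PySem.List.pyRepeat (PySem.Int.toChars N) i)).getD 0

-- the five dp[i].add(...) statements of A's innermost loop body
def addOps5 (s : PySet) (a b : Int) : PySet :=
  let s := Std.TreeSet.insert s (a + b)
  let s := Std.TreeSet.insert s (a - b)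
  let s := Std.TreeSet.insert s (a * b)
  let s := if b ≠ 0 then Std.TreeSet.insert s (PySem.Int.floordiv a b) else s
  if a ≠ 0 then Std.TreeSet.insert s (PySem.Int.floordiv b a) else s

-- A's 'for i in range(1,9)' loop with early return; dp is the mutable 9-entry list
def loopA (N number : Int) : List (PySet) → List Nat → Int
  | _, [] => -1
  | dp, i :: rest =>
    let si := Std.TreeSet.insert (dp.getD i (∅ : PySet)) (pvRep N (i : Int))
    let si := (List.range' 1 (i - 1)).foldl (fun s j =>
        (dp.getD j (∅ : PySet)).foldl (fun s a =>
          (dp.getD (i - j) (∅ : PySet)).foldl (fun s b => addOps5 s a b) s) s) si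
    if number ∈ si then (i : Int) else loopA N number (dp.set i si) rest

def solution (N : Int) (number : Int) : Int :=
  loopA N number (List.replicate 9 (∅ : PySet)) (List.range' 1 8)

-- ===== PORT B =====
-- the six vals.add(...) statements of B's innermost loop body
def addOps6 (s : PySet) (a b : Int) : PySet :=
  let s := Std.TreeSet.insert s (a + b)
  let s := Std.TreeSet.insert s (a - b)
  let s := Std.TreeSet.insert s (b - a)
  let s := Std.TreeSet.insert s (a * b)
  let s := if b ≠ 0 then Std.TreeSet.insert s (PySem.Int.floordiv a b) else s
  if a ≠ 0 then Std.TreeSet.insert s (PySem.Int.floordiv b a) else s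

-- B's reach(i) with its memo cache threaded explicitly: 'if i in cache: return cache[i]',
-- the symmetric-split loop, then 'cache[i] = vals'
def reachMemo (N : Int) (i : Nat) (cache : PySem.Dict Nat (PySet)) :
    PySet × PySem.Dict Nat (PySet) :=
  match PySem.Dict.get? cache i with
  | some v => (v, cache)
  | none =>
    let r := (List.range' 1 (i / 2)).attach.foldl
      (fun sc (j : {x // x ∈ List.range' 1 (i / 2)}) =>
        let rj := reachMemo N j.1 sc.2
        let rij := reachMemo N (i - j.1) rj.2
        (rj.1.foldl (fun s a => rij.1.foldl (fun s b => addOps6 s a b) s) sc.1, rij.2))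
      (Std.TreeSet.insert (∅ : PySet) (pvRep N (i : Int)), cache)
    (r.1, PySem.Dict.insert r.2 i r.1)
  termination_by i
  decreasing_by
  · have := List.mem_range'_1.mp j.2; omega
  · have := List.mem_range'_1.mp j.2; omega

-- B's final 'for i in range(1,9): if number in reach(i): return i'
def loopB (N number : Int) : PySem.Dict Nat (PySet) → List Nat → Int
  | _, [] => -1
  | c, i :: rest =>
    let rc := reachMemo N i c
    if number ∈ rc.1 then (i : Int) else loopB N number rc.2 rest

def solution_alt (N : Int) (number : Int) : Int :=
  loopB N number PySem.Dict.empty (List.range' 1 8)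

-- ===== PRECONDITION & SPEC =====
-- Pre_ excludes exactly the inputs where the Python A raises ValueError: for N < 0 and
-- number ≠ N, int(str(N)*2) = int("-k-k") raises (B's Python raises there too).
def Pre_solution (N : Int) (number : Int) : Prop := 0 ≤ N ∨ number = N
instance (N : Int) (number : Int) : Decidable (Pre_solution N number) := by
  unfold Pre_solution; infer_instance

def pvWitness_solution : Int × Int := (5, 12)

def Spec_solution (N : Int) (number : Int) (out : Int) : Prop := out = solution_alt N number
instance (N : Int) (number : Int) (out : Int) : Decidable (Spec_solution N number out) := by
  unfold Spec_solution; infer_instance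

-- ===== CLAIM (what is proved, stated in full; the proofs are below) =====
def Claim_equal_solution : Prop := ∀ (N : Int) (number : Int), Dom_solution N number → Pre_solution N number → Spec_solution N number (solution N number)

-- ===== LEMMAS AND PROOFS =====

-- the value of A's dp[i] once filled (proof-side name for A's recurrence)
def dpAset (N : Int) (i : Nat) : PySet :=
  (List.range' 1 (i - 1)).attach.foldl (fun s j =>
      (dpAset N j.1).foldl (fun s a =>
        (dpAset N (i - j.1)).foldl (fun s b => addOps5 s a b) s) s)
    (Std.TreeSet.insert (∅ : PySet) (pvRep N (i : Int)))
  termination_by i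
  decreasing_by
  · have := List.mem_range'_1.mp j.2; omega
  · have := List.mem_range'_1.mp j.2; omega

-- the value of B's reach(i) (cache-free recurrence)
def reachB (N : Int) (i : Nat) : PySet :=
  (List.range' 1 (i / 2)).attach.foldl (fun s j =>
      (reachB N j.1).foldl (fun s a =>
        (reachB N (i - j.1)).foldl (fun s b => addOps6 s a b) s) s)
    (Std.TreeSet.insert (∅ : PySet) (pvRep N (i : Int)))
  termination_by i
  decreasing_by
  · have := List.mem_range'_1.mp j.2; omega
  · have := List.mem_range'_1.mp j.2; omega

lemma dpAset_eq (N : Int) (i : Nat) :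
    dpAset N i = (List.range' 1 (i - 1)).foldl (fun s j =>
      (dpAset N j).foldl (fun s a =>
        (dpAset N (i - j)).foldl (fun s b => addOps5 s a b) s) s)
    (Std.TreeSet.insert (∅ : PySet) (pvRep N (i : Int))) := by
  rw [dpAset]
  exact List.foldl_attach (f := fun s j =>
      (dpAset N j).foldl (fun s a =>
        (dpAset N (i - j)).foldl (fun s b => addOps5 s a b) s) s) ..

lemma reachB_eq (N : Int) (i : Nat) :
    reachB N i = (List.range' 1 (i / 2)).foldl (fun s j =>
      (reachB N j).foldl (fun s a =>
        (reachB N (i - j)).foldl (fun s b => addOps6 s a b) s) s)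
    (Std.TreeSet.insert (∅ : PySet) (pvRep N (i : Int))) := by
  rw [reachB]
  exact List.foldl_attach (f := fun s j =>
      (reachB N j).foldl (fun s a =>
        (reachB N (i - j)).foldl (fun s b => addOps6 s a b) s) s) ..

def Ops5 (a b x : Int) : Prop :=
  x = a + b ∨ x = a - b ∨ x = a * b ∨
  (b ≠ 0 ∧ x = PySem.Int.floordiv a b) ∨ (a ≠ 0 ∧ x = PySem.Int.floordiv b a)

def Ops6 (a b x : Int) : Prop := Ops5 a b x ∨ x = b - a

lemma pySet_mem_insert (s : PySet) (v x : Int) :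
    x ∈ s.insert v ↔ x ∈ s ∨ x = v := by
  rw [Std.TreeSet.mem_insert]
  simp only [Std.LawfulEqCmp.compare_eq_iff_eq]
  tauto

lemma mem_addOps5 (s : PySet) (a b x : Int) :
    x ∈ addOps5 s a b ↔ x ∈ s ∨ Ops5 a b x := by
  unfold addOps5 Ops5
  split_ifs <;> simp_all <;> tauto

lemma mem_addOps6 (s : PySet) (a b x : Int) :
    x ∈ addOps6 s a b ↔ x ∈ s ∨ Ops6 a b x := by
  unfold addOps6 Ops6 Ops5
  split_ifs <;> simp_all <;> tauto

-- generic: membership in a fold that only adds elements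
lemma mem_foldl_iff {α : Type} (step : PySet → α → PySet)
    (P : α → Int → Prop)
    (h : ∀ s a x, x ∈ step s a ↔ x ∈ s ∨ P a x) :
    ∀ (L : List α) (s0 : PySet) (x : Int),
      x ∈ L.foldl step s0 ↔ x ∈ s0 ∨ ∃ a ∈ L, P a x := by
  intro L
  induction L with
  | nil => simp
  | cons hd tl ih =>
    intro s0 x
    simp only [List.foldl_cons, ih, h, List.mem_cons]
    constructor
    · rintro ((hs | hp) | ⟨a, ha, hpa⟩)
      · exact Or.inl hs
      · exact Or.inr ⟨hd, Or.inl rfl, hp⟩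
      · exact Or.inr ⟨a, Or.inr ha, hpa⟩
    · rintro (hs | ⟨a, (rfl | ha), hpa⟩)
      · exact Or.inl (Or.inl hs)
      · exact Or.inl (Or.inr hpa)
      · exact Or.inr ⟨a, ha, hpa⟩

lemma mem_setFold5 (T : PySet) (a : Int) (s : PySet) (x : Int) :
    x ∈ T.foldl (fun s b => addOps5 s a b) s ↔ x ∈ s ∨ ∃ b ∈ T, Ops5 a b x := by
  rw [Std.TreeSet.foldl_eq_foldl_toList,
    mem_foldl_iff _ (fun b x => Ops5 a b x) (fun s b x => mem_addOps5 s a b x)]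
  simp only [Std.TreeSet.mem_toList]

lemma mem_pairFold5 (S T s0 : PySet) (x : Int) :
    x ∈ S.foldl (fun s a => T.foldl (fun s b => addOps5 s a b) s) s0 ↔
      x ∈ s0 ∨ ∃ a ∈ S, ∃ b ∈ T, Ops5 a b x := by
  rw [Std.TreeSet.foldl_eq_foldl_toList,
    mem_foldl_iff _ (fun a x => ∃ b ∈ T, Ops5 a b x) (fun s a x => mem_setFold5 T a s x)]
  simp only [Std.TreeSet.mem_toList]

lemma mem_setFold6 (T : PySet) (a : Int) (s : PySet) (x : Int) :
    x ∈ T.foldl (fun s b => addOps6 s a b) s ↔ x ∈ s ∨ ∃ b ∈ T, Ops6 a b x := by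
  rw [Std.TreeSet.foldl_eq_foldl_toList,
    mem_foldl_iff _ (fun b x => Ops6 a b x) (fun s b x => mem_addOps6 s a b x)]
  simp only [Std.TreeSet.mem_toList]

lemma mem_pairFold6 (S T s0 : PySet) (x : Int) :
    x ∈ S.foldl (fun s a => T.foldl (fun s b => addOps6 s a b) s) s0 ↔
      x ∈ s0 ∨ ∃ a ∈ S, ∃ b ∈ T, Ops6 a b x := by
  rw [Std.TreeSet.foldl_eq_foldl_toList,
    mem_foldl_iff _ (fun a x => ∃ b ∈ T, Ops6 a b x) (fun s a x => mem_setFold6 T a s x)]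
  simp only [Std.TreeSet.mem_toList]

lemma mem_dpAset (N : Int) (i : Nat) (x : Int) :
    x ∈ dpAset N i ↔ x = pvRep N (i : Int) ∨
      ∃ j ∈ List.range' 1 (i - 1), ∃ a ∈ dpAset N j, ∃ b ∈ dpAset N (i - j), Ops5 a b x := by
  rw [dpAset_eq]
  rw [mem_foldl_iff _ (fun j x => ∃ a ∈ dpAset N j, ∃ b ∈ dpAset N (i - j), Ops5 a b x)
    (fun s j x => mem_pairFold5 (dpAset N j) (dpAset N (i - j)) s x)]
  simp only [pySet_mem_insert, Std.TreeSet.not_mem_emptyc, false_or]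

lemma mem_reachB (N : Int) (i : Nat) (x : Int) :
    x ∈ reachB N i ↔ x = pvRep N (i : Int) ∨
      ∃ j ∈ List.range' 1 (i / 2), ∃ a ∈ reachB N j, ∃ b ∈ reachB N (i - j), Ops6 a b x := by
  rw [reachB_eq]
  rw [mem_foldl_iff _ (fun j x => ∃ a ∈ reachB N j, ∃ b ∈ reachB N (i - j), Ops6 a b x)
    (fun s j x => mem_pairFold6 (reachB N j) (reachB N (i - j)) s x)]
  simp only [pySet_mem_insert, Std.TreeSet.not_mem_emptyc, false_or]

lemma ops5_swap (a b x : Int) (h : Ops5 a b x) : Ops6 b a x := by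
  unfold Ops6 Ops5 at *
  rcases h with h | h | h | h | h
  · exact Or.inl (Or.inl (by omega))
  · exact Or.inr (by omega)
  · exact Or.inl (Or.inr (Or.inr (Or.inl (by rw [h]; ring))))
  · exact Or.inl (Or.inr (Or.inr (Or.inr (Or.inr h))))
  · exact Or.inl (Or.inr (Or.inr (Or.inr (Or.inl h))))

lemma ops6_elim (a b x : Int) (h : Ops6 a b x) : Ops5 a b x ∨ Ops5 b a x := by
  unfold Ops6 Ops5 at *
  rcases h with h | h
  · exact Or.inl h
  · exact Or.inr (Or.inr (Or.inl (by omega)))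

-- the heart: A's dp[i] and B's reach(i) contain the same values
lemma memEquiv (N : Int) : ∀ (i : Nat) (x : Int), x ∈ dpAset N i ↔ x ∈ reachB N i := by
  intro i
  induction i using Nat.strong_induction_on with
  | _ i ih =>
    intro x
    rw [mem_dpAset, mem_reachB]
    constructor
    · rintro (h | ⟨j, hj, a, ha, b, hb, hops⟩)
      · exact Or.inl h
      · have hj' := List.mem_range'_1.mp hj
        by_cases hle : j ≤ i / 2
        · refine Or.inr ⟨j, List.mem_range'_1.mpr (by omega), a, ?_, b, ?_, Or.inl hops⟩
          · exact (ih j (by omega) a).mp ha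
          · exact (ih (i - j) (by omega) b).mp hb
        · refine Or.inr ⟨i - j, List.mem_range'_1.mpr (by omega), b, ?_, a, ?_, ?_⟩
          · exact (ih (i - j) (by omega) b).mp hb
          · have : i - (i - j) = j := by omega
            rw [this]; exact (ih j (by omega) a).mp ha
          · exact ops5_swap a b x hops
    · rintro (h | ⟨j, hj, a, ha, b, hb, hops⟩)
      · exact Or.inl h
      · have hj' := List.mem_range'_1.mp hj
        rcases ops6_elim a b x hops with h5 | h5
        · refine Or.inr ⟨j, List.mem_range'_1.mpr (by omega), a, ?_, b, ?_, h5⟩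
          · exact (ih j (by omega) a).mpr ha
          · exact (ih (i - j) (by omega) b).mpr hb
        · refine Or.inr ⟨i - j, List.mem_range'_1.mpr (by omega), b, ?_, a, ?_, h5⟩
          · exact (ih (i - j) (by omega) b).mpr hb
          · have : i - (i - j) = j := by omega
            rw [this]; exact (ih j (by omega) a).mpr ha

-- the membership scan both loops compute
def scanR (N number : Int) : List Nat → Int
  | [] => -1
  | i :: rest => if number ∈ reachB N i then (i : Int) else scanR N number rest

-- loopA with a correctly-filled dp prefix computes the scan
lemma loopA_run (N number : Int) :
    ∀ (n k : Nat) (dp : List (PySet)), dp.length = 9 → 1 ≤ k → k + n ≤ 9 →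
      (∀ j : Nat, dp.getD j (∅ : PySet) =
        if 1 ≤ j ∧ j < k then dpAset N j else (∅ : PySet)) →
      loopA N number dp (List.range' k n) = scanR N number (List.range' k n) := by
  intro n
  induction n with
  | zero => intro k dp _ _ _ _; simp [loopA, scanR]
  | succ n ih =>
    intro k dp hlen hk1 hkn hinv
    rw [List.range'_succ]
    show loopA N number dp (k :: List.range' (k+1) n) = scanR N number (k :: List.range' (k+1) n)
    rw [loopA, scanR]
    have hgetk : dp.getD k (∅ : PySet) = (∅ : PySet) := by
      rw [hinv k]; simp
    have hsi : (List.range' 1 (k - 1)).foldl (fun s j =>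
        (dp.getD j (∅ : PySet)).foldl (fun s a =>
          (dp.getD (k - j) (∅ : PySet)).foldl (fun s b => addOps5 s a b) s) s)
        (Std.TreeSet.insert (dp.getD k (∅ : PySet)) (pvRep N (k : Int))) = dpAset N k := by
      rw [hgetk, dpAset_eq]
      apply PySem.List.foldl_congr_mem
      intro s j hj
      have hj' := List.mem_range'_1.mp hj
      rw [hinv j, hinv (k - j)]
      rw [if_pos (by omega), if_pos (by omega)]
    simp only [hsi]
    have hiff := memEquiv N k number
    by_cases hmem : number ∈ dpAset N k
    · rw [if_pos hmem, if_pos (hiff.mp hmem)]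
    · rw [if_neg hmem, if_neg (fun h => hmem (hiff.mpr h))]
      apply ih (k + 1) (dp.set k (dpAset N k)) (by simp [hlen]) (by omega) (by omega)
      intro j
      rcases eq_or_ne j k with rfl | hne
      · rw [List.getD_eq_getElem?_getD, List.getElem?_set_self (by omega), if_pos (by omega)]
        simp
      · rw [List.getD_eq_getElem?_getD, List.getElem?_set_ne (by omega)]
        rw [← List.getD_eq_getElem?_getD, hinv j]
        rcases Nat.lt_or_ge j k with h | h
        · by_cases h1 : 1 ≤ j
          · rw [if_pos ⟨h1, h⟩, if_pos ⟨h1, by omega⟩]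
          · rw [if_neg (by omega), if_neg (by omega)]
        · rw [if_neg (by omega), if_neg (by omega)]

-- a cache is good when every entry is the corresponding reach value
def GoodC (N : Int) (c : PySem.Dict Nat (PySet)) : Prop :=
  ∀ k v, PySem.Dict.get? c k = some v → v = reachB N k

lemma reachMemo_spec (N : Int) :
    ∀ (i : Nat) (c : PySem.Dict Nat (PySet)), GoodC N c →
      (reachMemo N i c).1 = reachB N i ∧ GoodC N (reachMemo N i c).2 := by
  intro i
  induction i using Nat.strong_induction_on with
  | _ i ih =>
    intro c hc
    rw [reachMemo]
    cases hg : PySem.Dict.get? c i with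
    | some v => exact ⟨hc i v hg, hc⟩
    | none =>
      have key : ∀ (L : List {x // x ∈ List.range' 1 (i / 2)})
          (s : PySet) (c' : PySem.Dict Nat (PySet)), GoodC N c' →
          (L.foldl (fun sc (j : {x // x ∈ List.range' 1 (i / 2)}) =>
              let rj := reachMemo N j.1 sc.2
              let rij := reachMemo N (i - j.1) rj.2
              (rj.1.foldl (fun s a => rij.1.foldl (fun s b => addOps6 s a b) s) sc.1, rij.2))
            (s, c')).1 =
            L.foldl (fun s (j : {x // x ∈ List.range' 1 (i / 2)}) =>
              (reachB N j.1).foldl (fun s a =>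
                (reachB N (i - j.1)).foldl (fun s b => addOps6 s a b) s) s) s ∧
          GoodC N (L.foldl (fun sc (j : {x // x ∈ List.range' 1 (i / 2)}) =>
              let rj := reachMemo N j.1 sc.2
              let rij := reachMemo N (i - j.1) rj.2
              (rj.1.foldl (fun s a => rij.1.foldl (fun s b => addOps6 s a b) s) sc.1, rij.2))
            (s, c')).2 := by
        intro L
        induction L with
        | nil => intro s c' hc'; exact ⟨rfl, hc'⟩
        | cons hd tl ihL =>
          intro s c' hc'
          have hb := List.mem_range'_1.mp hd.2
          have h1 := ih hd.1 (by omega) c' hc'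
          have h2 := ih (i - hd.1) (by omega) (reachMemo N hd.1 c').2 h1.2
          simp only [List.foldl_cons]
          rw [h1.1, h2.1]
          exact ihL _ _ h2.2
      have hkey := key (List.range' 1 (i / 2)).attach
        (Std.TreeSet.insert (∅ : PySet) (pvRep N (i : Int))) c hc
      constructor
      · simp only [hkey.1]
        rw [reachB]
      · intro k v hkv
        by_cases hk : k = i
        · subst hk
          rw [PySem.Dict.get?_insert_self] at hkv
          cases hkv
          simp only [hkey.1]
          rw [reachB]
        · rw [PySem.Dict.get?_insert_of_ne _ _ hk] at hkv
          exact hkey.2 k v hkv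

lemma goodC_empty (N : Int) : GoodC N PySem.Dict.empty := by
  intro k v h
  simp [PySem.Dict.get?_empty] at h

lemma loopB_run (N number : Int) :
    ∀ (L : List Nat) (c : PySem.Dict Nat (PySet)), GoodC N c →
      loopB N number c L = scanR N number L := by
  intro L
  induction L with
  | nil => intro c _; rfl
  | cons i rest ih =>
    intro c hc
    have h := reachMemo_spec N i c hc
    rw [loopB, scanR]
    simp only [h.1]
    by_cases hmem : number ∈ reachB N i
    · rw [if_pos hmem, if_pos hmem]
    · rw [if_neg hmem, if_neg hmem]
      exact ih _ h.2

-- ===== VERDICT (by name: the statement is the Claim_ definition above) =====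
theorem solution_spec : Claim_equal_solution := by
  intro N number _ _
  unfold Spec_solution solution solution_alt
  have hA : loopA N number (List.replicate 9 (∅ : PySet)) (List.range' 1 8) =
      scanR N number (List.range' 1 8) := by
    refine loopA_run N number 8 1 (List.replicate 9 (∅ : PySet)) (by simp) (by omega) (by omega) ?_
    intro j
    rw [if_neg (by omega), List.getD_eq_getElem?_getD, List.getElem?_replicate]
    rcases Nat.lt_or_ge j 9 with h | h
    · rw [if_pos h]; rfl
    · rw [if_neg (by omega)]; rfl
  have hB : loopB N number PySem.Dict.empty (List.range' 1 8) =
      scanR N number (List.range' 1 8) := loopB_run N number _ _ (goodC_empty N)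
  rw [hA, hB]
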